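-- pv_equiv track=rewrite | github.com/dawoonykim/python_dowoonyKim | 24.12.19/programmers_codingtest12.py | solution
-- ===== SOURCE A (Python) =====
-- def solution(numbers):
--     answer = set()
--     count = 1
--     for i in range(len(numbers)):
--         for j in range(count, len(numbers)):
--             if not numbers[i] == numbers[j]:
--                 answer.add(numbers[i]*numbers[j])
--         count+=1
--     return sorted(answer)
-- ===== SOURCE B (Python) =====
-- def solution(numbers):
--     vals = sorted(set(numbers))
--     answer = set()
--     for i in range(len(vals)):
--         for j in range(i + 1, len(vals)):
--             answer.add(vals[i] * vals[j])
--     return sorted(answer)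
-- ===== Notes on version B (the rewrite author's own statement) =====
-- stated objective: alternative
-- what changed: B first deduplicates and sorts the values (sorted(set(numbers))) and then multiplies unordered pairs of distinct values with no equality guard, instead of A's double loop over all index pairs with a per-pair equality test and a manually maintained count variable.
import Mathlib
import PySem

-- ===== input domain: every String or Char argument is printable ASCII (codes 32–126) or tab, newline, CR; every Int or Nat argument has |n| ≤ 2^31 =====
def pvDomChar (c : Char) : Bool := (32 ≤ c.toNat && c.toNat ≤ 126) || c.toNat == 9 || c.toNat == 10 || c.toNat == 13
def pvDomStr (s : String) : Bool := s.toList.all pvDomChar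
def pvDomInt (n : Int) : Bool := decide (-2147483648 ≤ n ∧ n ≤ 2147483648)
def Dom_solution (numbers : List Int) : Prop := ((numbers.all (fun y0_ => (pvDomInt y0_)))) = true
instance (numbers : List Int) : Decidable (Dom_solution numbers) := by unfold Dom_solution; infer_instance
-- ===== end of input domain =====

-- B deduplicates the values first (sorted(set(numbers))) and multiplies unordered pairs of
-- distinct values with no equality guard, instead of A's double loop over all index pairs.

-- ===== PORT A =====
-- indices i, j produced by range(...) are always in range, so pyGetD with default 0 is exact here
def solution (numbers : List Int) : List Int :=
  let st := (PySem.List.pyRange 0 (numbers.length : Int) 1).foldl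
    (fun (st : PySem.Set Int × Int) i =>
      ((PySem.List.pyRange st.2 (numbers.length : Int) 1).foldl
        (fun acc j =>
          if !(PySem.List.pyGetD numbers i 0 == PySem.List.pyGetD numbers j 0)
          then PySem.Set.add acc (PySem.List.pyGetD numbers i 0 * PySem.List.pyGetD numbers j 0)
          else acc) st.1,
       st.2 + 1))
    ((PySem.Set.empty : PySem.Set Int), 1)
  PySem.List.sorted st.1 (fun x => x) false

-- ===== PORT B =====
def solution_alt (numbers : List Int) : List Int :=
  let vals := PySem.List.sorted (PySem.Set.ofList numbers) (fun x => x) false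
  let answer := (PySem.List.pyRange 0 (vals.length : Int) 1).foldl
    (fun acc i =>
      (PySem.List.pyRange (i + 1) (vals.length : Int) 1).foldl
        (fun a j => PySem.Set.add a (PySem.List.pyGetD vals i 0 * PySem.List.pyGetD vals j 0))
        acc)
    (PySem.Set.empty : PySem.Set Int)
  PySem.List.sorted answer (fun x => x) false

-- ===== PRECONDITION & SPEC =====
def Spec_solution (numbers : List Int) (out : List Int) : Prop := out = solution_alt numbers
instance (numbers : List Int) (out : List Int) : Decidable (Spec_solution numbers out) := by unfold Spec_solution; infer_instance

-- ===== CLAIM (what is proved, stated in full; the proofs are below) =====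
def Claim_equal_solution : Prop := ∀ (numbers : List Int), Dom_solution numbers → Spec_solution numbers (solution numbers)

-- ===== LEMMAS AND PROOFS =====

-- the step function of A's outer loop (for proofs only; the port inlines it)
def AF (numbers : List Int) : PySem.Set Int × Int → Int → PySem.Set Int × Int :=
  fun st i =>
    ((PySem.List.pyRange st.2 (numbers.length : Int) 1).foldl
      (fun acc j =>
        if !(PySem.List.pyGetD numbers i 0 == PySem.List.pyGetD numbers j 0)
        then PySem.Set.add acc (PySem.List.pyGetD numbers i 0 * PySem.List.pyGetD numbers j 0)
        else acc) st.1,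
     st.2 + 1)

lemma solution_eq (numbers : List Int) :
    solution numbers =
      PySem.List.sorted
        (((PySem.List.pyRange 0 (numbers.length : Int) 1).foldl (AF numbers)
          ((PySem.Set.empty : PySem.Set Int), 1)).1) (fun x => x) false := rfl

-- the value predicate both result sets realise
def Pprod (numbers : List Int) (x : Int) : Prop :=
  ∃ a ∈ numbers, ∃ b ∈ numbers, a ≠ b ∧ x = a * b

lemma mem_foldl_add_if (l : List Int) (g : Int → Bool) (f : Int → Int)
    (s : PySem.Set Int) (x : Int) :
    (x ∈ l.foldl (fun acc j => if g j then PySem.Set.add acc (f j) else acc) s) ↔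
      x ∈ s ∨ ∃ j ∈ l, g j = true ∧ x = f j := by
  induction l generalizing s with
  | nil => simp
  | cons a t ih =>
    simp only [List.foldl_cons]
    by_cases h : g a
    · simp only [h, if_pos]
      rw [ih]
      simp [PySem.Set.mem_add]
      tauto
    · have hg : g a = false := by simpa using h
      rw [if_neg (by simp [hg]), ih]
      simp [hg]

lemma mem_foldl_add (l : List Int) (f : Int → Int) (s : PySem.Set Int) (x : Int) :
    (x ∈ l.foldl (fun acc j => PySem.Set.add acc (f j)) s) ↔ x ∈ s ∨ ∃ j ∈ l, x = f j := by
  induction l generalizing s with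
  | nil => simp
  | cons a t ih =>
    simp only [List.foldl_cons]
    rw [ih]
    simp [PySem.Set.mem_add]
    tauto

lemma nodup_foldl_set {F : PySem.Set Int → Int → PySem.Set Int}
    (hF : ∀ s i, s.Nodup → (F s i).Nodup) (l : List Int) (s : PySem.Set Int)
    (hs : s.Nodup) : (l.foldl F s).Nodup := by
  induction l generalizing s with
  | nil => exact hs
  | cons a t ih => exact ih _ (hF _ _ hs)

lemma AF_snd (numbers : List Int) (l : List Int) (s : PySem.Set Int) (c : Int) :
    (l.foldl (AF numbers) (s, c)).2 = c + l.length := by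
  induction l generalizing s c with
  | nil => simp
  | cons a t ih =>
    simp only [List.foldl_cons, AF, ih, List.length_cons]
    push_cast
    ring

lemma AF_mem (numbers : List Int) (k : Nat) (x : Int) :
    (x ∈ ((PySem.List.pyRange 0 (k : Int) 1).foldl (AF numbers)
        ((PySem.Set.empty : PySem.Set Int), 1)).1) ↔
      ∃ i j : Int, 0 ≤ i ∧ i < (k : Int) ∧ i < j ∧ j < (numbers.length : Int) ∧
        PySem.List.pyGetD numbers i 0 ≠ PySem.List.pyGetD numbers j 0 ∧
        x = PySem.List.pyGetD numbers i 0 * PySem.List.pyGetD numbers j 0 := by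
  induction k with
  | zero =>
    rw [PySem.List.pyRange_one_eq_nil (by norm_num)]
    simp only [List.foldl_nil]
    constructor
    · intro h; simp [PySem.Set.empty] at h
    · rintro ⟨i, j, h1, h2, -⟩; omega
  | succ k ih =>
    have hk : ((k : Int) + 1) = ((k + 1 : Nat) : Int) := by push_cast; ring
    rw [← hk, PySem.List.pyRange_one_succ_right (by omega), List.foldl_append]
    have hsnd : ((PySem.List.pyRange 0 (k : Int) 1).foldl (AF numbers)
        ((PySem.Set.empty : PySem.Set Int), 1)).2 = (k : Int) + 1 := by
      rw [show ((PySem.Set.empty : PySem.Set Int), (1 : Int)) =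
        (((PySem.Set.empty : PySem.Set Int)), (1 : Int)) from rfl, AF_snd]
      rw [PySem.List.length_pyRange_one]
      omega
    simp only [List.foldl_cons, List.foldl_nil, AF, hsnd]
    rw [mem_foldl_add_if, ih]
    constructor
    · rintro (⟨i, j, h1, h2, h3, h4, h5, h6⟩ | ⟨j, hj, hg, hx⟩)
      · exact ⟨i, j, h1, by omega, h3, h4, h5, h6⟩
      · rw [PySem.List.mem_pyRange_one] at hj
        refine ⟨(k : Int), j, ?_, ?_, ?_, ?_, by simpa using hg, hx⟩ <;> omega
    · rintro ⟨i, j, h1, h2, h3, h4, h5, h6⟩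
      by_cases hik : i < (k : Int)
      · exact Or.inl ⟨i, j, h1, hik, h3, h4, h5, h6⟩
      · have hieq : i = (k : Int) := by omega
        subst hieq
        refine Or.inr ⟨j, ?_, by simpa using h5, h6⟩
        rw [PySem.List.mem_pyRange_one]
        omega

lemma AF_mem_iff_P (numbers : List Int) (x : Int) :
    (x ∈ ((PySem.List.pyRange 0 (numbers.length : Int) 1).foldl (AF numbers)
        ((PySem.Set.empty : PySem.Set Int), 1)).1) ↔ Pprod numbers x := by
  rw [AF_mem numbers numbers.length x]
  constructor
  · rintro ⟨i, j, h1, h2, h3, h4, h5, h6⟩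
    rw [PySem.List.pyGetD_eq_getElem numbers 0 h1 h2,
        PySem.List.pyGetD_eq_getElem numbers 0 (by omega) h4] at h5 h6
    exact ⟨_, List.getElem_mem _, _, List.getElem_mem _, h5, h6⟩
  · rintro ⟨a, ha, b, hb, hne, hx⟩
    obtain ⟨p, hp, hpa⟩ := List.mem_iff_getElem.mp ha
    obtain ⟨q, hq, hqb⟩ := List.mem_iff_getElem.mp hb
    have hpq : p ≠ q := by rintro rfl; exact hne (hpa.symm.trans hqb)
    rcases Nat.lt_or_gt_of_ne hpq with h | h
    · refine ⟨(p : Int), (q : Int), ?_, ?_, ?_, ?_, ?_, ?_⟩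
      · omega
      · exact_mod_cast hp
      · exact_mod_cast h
      · exact_mod_cast hq
      · rw [PySem.List.pyGetD_eq_getElem numbers 0 (by omega) (by exact_mod_cast hp),
            PySem.List.pyGetD_eq_getElem numbers 0 (by omega) (by exact_mod_cast hq)]
        simp [hpa, hqb, hne]
      · rw [PySem.List.pyGetD_eq_getElem numbers 0 (by omega) (by exact_mod_cast hp),
            PySem.List.pyGetD_eq_getElem numbers 0 (by omega) (by exact_mod_cast hq)]
        simp [hpa, hqb, hx]
    · refine ⟨(q : Int), (p : Int), ?_, ?_, ?_, ?_, ?_, ?_⟩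
      · omega
      · exact_mod_cast hq
      · exact_mod_cast h
      · exact_mod_cast hp
      · rw [PySem.List.pyGetD_eq_getElem numbers 0 (by omega) (by exact_mod_cast hq),
            PySem.List.pyGetD_eq_getElem numbers 0 (by omega) (by exact_mod_cast hp)]
        simp [hpa, hqb]
        exact fun e => hne e.symm
      · rw [PySem.List.pyGetD_eq_getElem numbers 0 (by omega) (by exact_mod_cast hq),
            PySem.List.pyGetD_eq_getElem numbers 0 (by omega) (by exact_mod_cast hp)]
        simp [hpa, hqb, hx, mul_comm]

lemma AF_nodup (numbers : List Int) (l : List Int) (st : PySem.Set Int × Int)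
    (h : st.1.Nodup) : (l.foldl (AF numbers) st).1.Nodup := by
  induction l generalizing st with
  | nil => exact h
  | cons a t ih =>
    refine ih _ ?_
    show ((PySem.List.pyRange st.2 (numbers.length : Int) 1).foldl _ st.1).Nodup
    refine nodup_foldl_set (fun s i hs => ?_) _ _ h
    dsimp only
    split
    · exact PySem.Set.nodup_add _ _ hs
    · exact hs

-- B-side facts about vals = sorted(set(numbers))
lemma vals_nodup (numbers : List Int) :
    (PySem.List.sorted (PySem.Set.ofList numbers) (fun x => x) false).Nodup :=
  (PySem.List.sorted_perm _ _ _).nodup_iff.mpr (PySem.Set.nodup_ofList numbers)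

lemma vals_mem (numbers : List Int) (a : Int) :
    a ∈ PySem.List.sorted (PySem.Set.ofList numbers) (fun x => x) false ↔ a ∈ numbers := by
  rw [PySem.List.mem_sorted, PySem.Set.mem_ofList]

lemma B_outer_mem (vals : List Int) (x : Int) :
    (x ∈ (PySem.List.pyRange 0 (vals.length : Int) 1).foldl
      (fun acc i =>
        (PySem.List.pyRange (i + 1) (vals.length : Int) 1).foldl
          (fun a j => PySem.Set.add a (PySem.List.pyGetD vals i 0 * PySem.List.pyGetD vals j 0))
          acc)
      (PySem.Set.empty : PySem.Set Int)) ↔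
    ∃ i ∈ PySem.List.pyRange 0 (vals.length : Int) 1,
      ∃ j ∈ PySem.List.pyRange (i + 1) (vals.length : Int) 1,
        x = PySem.List.pyGetD vals i 0 * PySem.List.pyGetD vals j 0 := by
  generalize hL : PySem.List.pyRange 0 (vals.length : Int) 1 = l
  have : ∀ (l' : List Int) (s : PySem.Set Int),
      (x ∈ l'.foldl
        (fun acc i =>
          (PySem.List.pyRange (i + 1) (vals.length : Int) 1).foldl
            (fun a j => PySem.Set.add a (PySem.List.pyGetD vals i 0 * PySem.List.pyGetD vals j 0))
            acc) s) ↔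
      x ∈ s ∨ ∃ i ∈ l', ∃ j ∈ PySem.List.pyRange (i + 1) (vals.length : Int) 1,
        x = PySem.List.pyGetD vals i 0 * PySem.List.pyGetD vals j 0 := by
    intro l' s
    induction l' generalizing s with
    | nil => simp
    | cons a t ih =>
      simp only [List.foldl_cons]
      rw [ih, mem_foldl_add]
      simp only [PySem.List.mem_pyRange_one, List.mem_cons, exists_eq_or_imp]
      exact or_assoc
  rw [this]
  simp [PySem.Set.empty]

lemma B_mem_iff_P (numbers : List Int) (x : Int) :
    (x ∈ (PySem.List.pyRange 0
        ((PySem.List.sorted (PySem.Set.ofList numbers) (fun x => x) false).length : Int) 1).foldl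
      (fun acc i =>
        (PySem.List.pyRange (i + 1)
            ((PySem.List.sorted (PySem.Set.ofList numbers) (fun x => x) false).length : Int) 1).foldl
          (fun a j => PySem.Set.add a
            (PySem.List.pyGetD (PySem.List.sorted (PySem.Set.ofList numbers) (fun x => x) false) i 0 *
             PySem.List.pyGetD (PySem.List.sorted (PySem.Set.ofList numbers) (fun x => x) false) j 0))
          acc)
      (PySem.Set.empty : PySem.Set Int)) ↔ Pprod numbers x := by
  set vals := PySem.List.sorted (PySem.Set.ofList numbers) (fun x => x) false with hvals
  rw [B_outer_mem]
  have hnd := vals_nodup numbers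
  rw [← hvals] at hnd
  constructor
  · rintro ⟨i, hi, j, hj, hx⟩
    rw [PySem.List.mem_pyRange_one] at hi hj
    rw [PySem.List.pyGetD_eq_getElem vals 0 hi.1 hi.2,
        PySem.List.pyGetD_eq_getElem vals 0 (by omega) hj.2] at hx
    have hij : i.toNat ≠ j.toNat := by omega
    refine ⟨_, (vals_mem numbers _).mp (List.getElem_mem _),
            _, (vals_mem numbers _).mp (List.getElem_mem _), ?_, hx⟩
    intro heq
    exact hij ((hnd.getElem_inj_iff).mp heq)
  · rintro ⟨a, ha, b, hb, hne, hx⟩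
    rw [← vals_mem numbers a, ← hvals] at ha
    rw [← vals_mem numbers b, ← hvals] at hb
    obtain ⟨p, hp, hpa⟩ := List.mem_iff_getElem.mp ha
    obtain ⟨q, hq, hqb⟩ := List.mem_iff_getElem.mp hb
    have hpq : p ≠ q := by rintro rfl; exact hne (hpa.symm.trans hqb)
    rcases Nat.lt_or_gt_of_ne hpq with h | h
    · refine ⟨(p : Int), ?_, (q : Int), ?_, ?_⟩
      · rw [PySem.List.mem_pyRange_one]; omega
      · rw [PySem.List.mem_pyRange_one]; omega
      · rw [PySem.List.pyGetD_eq_getElem vals 0 (by omega) (by exact_mod_cast hp),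
            PySem.List.pyGetD_eq_getElem vals 0 (by omega) (by exact_mod_cast hq)]
        simp [hpa, hqb, hx]
    · refine ⟨(q : Int), ?_, (p : Int), ?_, ?_⟩
      · rw [PySem.List.mem_pyRange_one]; omega
      · rw [PySem.List.mem_pyRange_one]; omega
      · rw [PySem.List.pyGetD_eq_getElem vals 0 (by omega) (by exact_mod_cast hq),
            PySem.List.pyGetD_eq_getElem vals 0 (by omega) (by exact_mod_cast hp)]
        simp [hpa, hqb, hx, mul_comm]

lemma B_nodup (vals : List Int) :
    ((PySem.List.pyRange 0 (vals.length : Int) 1).foldl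
      (fun acc i =>
        (PySem.List.pyRange (i + 1) (vals.length : Int) 1).foldl
          (fun a j => PySem.Set.add a (PySem.List.pyGetD vals i 0 * PySem.List.pyGetD vals j 0))
          acc)
      (PySem.Set.empty : PySem.Set Int)).Nodup := by
  refine nodup_foldl_set (fun s i hs => ?_) _ _ (by simp [PySem.Set.empty])
  exact nodup_foldl_set (fun s' j hs' => PySem.Set.nodup_add _ _ hs') _ _ hs

-- ===== VERDICT (by name: the statement is the Claim_ definition above) =====
theorem solution_spec : Claim_equal_solution := by
  intro numbers _
  unfold Spec_solution
  rw [solution_eq]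
  show _ = PySem.List.sorted _ (fun x => x) false
  refine PySem.List.sorted_eq_sorted_of_perm _ _ _ (fun a b h => h) ?_
  rw [List.perm_ext_iff_of_nodup
    (AF_nodup numbers _ _ (by simp [PySem.Set.empty])) (B_nodup _)]
  intro y
  rw [AF_mem_iff_P, B_mem_iff_P]
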